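-- pv_equiv track=rewrite | github.com/SP-Autonomy/agent-accountability-platform | saas/services/dashboard/utils/dashboard_utils.py | filter_usages
-- ===== SOURCE A (Python) =====
-- LAB_PREFIXES: tuple[str, ...] = ("scenario-",)
--
-- def filter_usages(
--     usages: list[dict],
--     include_labs: bool,
--     pid_map: dict[int, str],
-- ) -> list[dict]:
--     """
--     Remove tool-usage records from lab agents.
--
--     pid_map: {principal_id: agent_name} - from the principals list.
--     """
--     if include_labs:
--         return usages
--     lab_names: set[str] = {
--         name for name in pid_map.values()
--         if any(name.lower().startswith(p) for p in LAB_PREFIXES)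
--     }
--     return [
--         u for u in usages
--         if pid_map.get(u.get("principal_id") or 0, "") not in lab_names
--     ]
-- ===== SOURCE B (Python) =====
-- LAB_PREFIXES: tuple[str, ...] = ("scenario-",)
--
-- def filter_usages(usages, include_labs, pid_map):
--     """Remove tool-usage records from lab agents (no intermediate set:
--     the lab-prefix test is applied directly to each record's agent name)."""
--     if include_labs:
--         return usages
--     result = []
--     for u in usages:
--         name = pid_map.get(u.get("principal_id") or 0, "")
--         if not any(name.lower().startswith(p) for p in LAB_PREFIXES):
--             result.append(u)
--     return result
-- ===== Notes on version B (the rewrite author's own statement) =====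
-- stated objective: simpler
-- what changed: B drops A's precomputed lab_names set entirely: one explicit loop applies the lab-prefix test directly to each record's looked-up agent name, instead of building a set of lab names from pid_map.values() and testing membership.
import Mathlib
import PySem

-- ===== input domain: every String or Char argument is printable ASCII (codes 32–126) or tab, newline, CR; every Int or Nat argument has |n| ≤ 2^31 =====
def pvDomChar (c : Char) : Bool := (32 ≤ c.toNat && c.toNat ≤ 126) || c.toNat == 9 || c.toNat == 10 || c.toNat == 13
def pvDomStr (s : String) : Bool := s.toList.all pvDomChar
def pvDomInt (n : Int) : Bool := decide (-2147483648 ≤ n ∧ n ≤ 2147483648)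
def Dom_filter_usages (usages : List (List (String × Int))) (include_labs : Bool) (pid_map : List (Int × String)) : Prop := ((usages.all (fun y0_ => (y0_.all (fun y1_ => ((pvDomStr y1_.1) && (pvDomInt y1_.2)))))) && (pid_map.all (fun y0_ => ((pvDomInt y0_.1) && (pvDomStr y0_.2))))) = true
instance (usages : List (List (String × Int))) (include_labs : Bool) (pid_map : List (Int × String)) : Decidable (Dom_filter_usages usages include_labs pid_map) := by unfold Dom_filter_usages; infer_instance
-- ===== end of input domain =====

-- B drops A's intermediate lab_names set: one explicit loop tests the lab prefix
-- directly on each record's looked-up agent name (objective: simpler).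


-- LAB_PREFIXES = ("scenario-",)
def pvLabPrefixes : List String := ["scenario-"]

-- u.get("principal_id") or 0  (the same expression occurs in both sources)
def pvPid (u : List (String × Int)) : Int :=
  match (PySem.Dict.mk u).get? "principal_id" with
  | some v => if v == 0 then 0 else v
  | none => 0

-- any(name.lower().startswith(p) for p in LAB_PREFIXES)
def pvIsLab (name : String) : Bool :=
  pvLabPrefixes.any (fun p => PySem.Str.startswith (PySem.Str.lower name) p)

-- ===== PORT A =====
def filter_usages (usages : List (List (String × Int))) (include_labs : Bool) (pid_map : List (Int × String)) : List (List (String × Int)) :=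
  if include_labs then usages
  else
    let lab_names : PySem.Set String :=
      PySem.Set.ofList (((PySem.Dict.mk pid_map).values).filter (fun name => pvIsLab name))
    usages.filter (fun u =>
      !(PySem.Set.contains lab_names ((PySem.Dict.mk pid_map).getD (pvPid u) "")))

-- ===== PORT B =====
def filter_usages_alt (usages : List (List (String × Int))) (include_labs : Bool) (pid_map : List (Int × String)) : List (List (String × Int)) :=
  if include_labs then usages
  else
    usages.foldl (fun result u =>
      let name := (PySem.Dict.mk pid_map).getD (pvPid u) ""
      if !(pvIsLab name) then result ++ [u] else result) []

-- ===== PRECONDITION & SPEC =====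
def Spec_filter_usages (usages : List (List (String × Int))) (include_labs : Bool) (pid_map : List (Int × String)) (out : List (List (String × Int))) : Prop := out = filter_usages_alt usages include_labs pid_map
instance (usages : List (List (String × Int))) (include_labs : Bool) (pid_map : List (Int × String)) (out : List (List (String × Int))) : Decidable (Spec_filter_usages usages include_labs pid_map out) := by unfold Spec_filter_usages; infer_instance

-- ===== CLAIM (what is proved, stated in full; the proofs are below) =====
def Claim_equal_filter_usages : Prop := ∀ (usages : List (List (String × Int))) (include_labs : Bool) (pid_map : List (Int × String)), Dom_filter_usages usages include_labs pid_map → Spec_filter_usages usages include_labs pid_map (filter_usages usages include_labs pid_map)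

-- ===== LEMMAS AND PROOFS =====

-- A looked-up value is either the default or one of the dict's values.
lemma getD_default_or_mem_values (d : PySem.Dict Int String) (k : Int) (dflt : String) :
    d.getD k dflt = dflt ∨ d.getD k dflt ∈ d.values := by
  cases h : d.get? k with
  | none => left; exact PySem.Dict.getD_of_get?_eq_none d dflt h
  | some v =>
    right
    have hv : d.getD k dflt = v := PySem.Dict.getD_of_get?_eq_some d dflt h
    have := PySem.Dict.mem_items_of_get?_eq_some d h
    rw [hv]
    simpa [PySem.Dict.values] using ⟨k, this⟩

-- A's per-record set-membership test coincides with B's direct prefix test.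
lemma contains_labnames_eq (pid_map : List (Int × String)) (k : Int) :
    PySem.Set.contains
      (PySem.Set.ofList (((PySem.Dict.mk pid_map).values).filter (fun name => pvIsLab name)))
      ((PySem.Dict.mk pid_map).getD k "")
    = pvIsLab ((PySem.Dict.mk pid_map).getD k "") := by
  set d := PySem.Dict.mk pid_map
  set name := d.getD k "" with hname
  by_cases hlab : pvIsLab name = true
  · have hmem : name ∈ d.values := by
      rcases getD_default_or_mem_values d k "" with h0 | hv
      · exfalso
        rw [hname, h0] at hlab
        exact absurd hlab (by decide)
      · exact hv
    rw [hlab]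
    simp [PySem.Set.contains, PySem.Set.mem_ofList, List.mem_filter, hmem, hlab]
  · rw [Bool.not_eq_true] at hlab
    rw [hlab]
    simp [PySem.Set.contains, PySem.Set.mem_ofList, List.mem_filter, hlab]

lemma foldl_filter (p : List (String × Int) → Bool) (usages acc : List (List (String × Int))) :
    usages.foldl (fun result u => if p u then result ++ [u] else result) acc
      = acc ++ usages.filter p := by
  induction usages generalizing acc with
  | nil => simp
  | cons u us ih =>
    by_cases h : p u <;> simp [List.foldl_cons, h, ih]

-- ===== VERDICT (by name: the statement is the Claim_ definition above) =====
theorem filter_usages_spec : Claim_equal_filter_usages := by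
  intro usages include_labs pid_map _
  unfold Spec_filter_usages filter_usages filter_usages_alt
  cases include_labs with
  | true => simp
  | false =>
    simp only [if_neg (by decide : ¬ (false = true))]
    rw [foldl_filter (fun u => !(pvIsLab ((PySem.Dict.mk pid_map).getD (pvPid u) "")))]
    simp only [List.nil_append]
    apply List.filter_congr
    intro u _
    rw [contains_labnames_eq pid_map (pvPid u)]
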